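-- pv_equiv track=rewrite | github.com/nihaljeronia/Swastha-Sevak | app/ml/classifier.py | _mock_urgency
-- ===== SOURCE A (Python) =====
-- def _mock_urgency(symptoms: list[str]) -> str:
--     emergency_symptoms = {"chest_pain", "seizure", "breathlessness", "confusion", "blood_in_stool"}
--     urgent_symptoms = {"fever", "joint_pain", "rash", "yellow_skin", "blood_in_urine"}
--
--     if any(s in emergency_symptoms for s in symptoms):
--         return "emergency"
--     if len(set(symptoms) & urgent_symptoms) >= 2:
--         return "urgent"
--     if any(s in urgent_symptoms for s in symptoms):
--         return "routine"
--     return "self_care"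
-- ===== SOURCE B (Python) =====
-- def _mock_urgency(symptoms: list[str]) -> str:
--     SEVERITY = {
--         "chest_pain": 2, "seizure": 2, "breathlessness": 2, "confusion": 2, "blood_in_stool": 2,
--         "fever": 1, "joint_pain": 1, "rash": 1, "yellow_skin": 1, "blood_in_urine": 1,
--     }
--     levels = {s: SEVERITY.get(s, 0) for s in symptoms}  # dedupes symptoms, keeps first occurrences
--     if 2 in levels.values():
--         return "emergency"
--     urgent = sum(1 for v in levels.values() if v == 1)
--     return ("self_care", "routine", "urgent")[min(urgent, 2)]
-- ===== Notes on version B (the rewrite author's own statement) =====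
-- stated objective: alternative
-- what changed: Replaces A's two membership sets and three staged scans with a single severity lookup table, a dict comprehension keyed by symptom that deduplicates, a 0/1/2-level value scan, and a table indexed by min(distinct urgent count, 2).
import Mathlib
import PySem

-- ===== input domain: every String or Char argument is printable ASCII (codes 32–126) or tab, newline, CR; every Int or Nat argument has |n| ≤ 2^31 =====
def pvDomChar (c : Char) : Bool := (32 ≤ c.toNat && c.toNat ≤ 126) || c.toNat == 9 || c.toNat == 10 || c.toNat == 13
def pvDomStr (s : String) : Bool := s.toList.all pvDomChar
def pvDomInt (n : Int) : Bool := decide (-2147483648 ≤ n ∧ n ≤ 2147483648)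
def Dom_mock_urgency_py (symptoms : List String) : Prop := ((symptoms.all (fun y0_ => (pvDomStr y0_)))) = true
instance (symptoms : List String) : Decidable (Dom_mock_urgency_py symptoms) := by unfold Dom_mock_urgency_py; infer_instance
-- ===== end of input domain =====

-- B replaces A's two membership sets and three staged scans by one severity lookup table, a deduplicating
-- dict keyed by symptom, and a result table indexed by min(distinct urgent count, 2); same O(n) cost.

-- ===== PORT A =====
def pvEmergencyA : PySem.Set String :=
  PySem.Set.ofList ["chest_pain", "seizure", "breathlessness", "confusion", "blood_in_stool"]
def pvUrgentA : PySem.Set String :=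
  PySem.Set.ofList ["fever", "joint_pain", "rash", "yellow_skin", "blood_in_urine"]

def mock_urgency_py (symptoms : List String) : String :=
  if symptoms.any (fun s => PySem.Set.contains pvEmergencyA s) then "emergency"
  else if 2 ≤ PySem.Set.len (PySem.Set.inter (PySem.Set.ofList symptoms) pvUrgentA) then "urgent"
  else if symptoms.any (fun s => PySem.Set.contains pvUrgentA s) then "routine"
  else "self_care"

-- ===== PORT B =====
def pvSeverity : PySem.Dict String Int :=
  PySem.Dict.ofList
    [("chest_pain", 2), ("seizure", 2), ("breathlessness", 2), ("confusion", 2), ("blood_in_stool", 2),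
     ("fever", 1), ("joint_pain", 1), ("rash", 1), ("yellow_skin", 1), ("blood_in_urine", 1)]

def mock_urgency_py_alt (symptoms : List String) : String :=
  let levels : PySem.Dict String Int :=
    symptoms.foldl (fun d s => d.insert s (pvSeverity.getD s 0)) PySem.Dict.empty
  if (levels.values).contains 2 then "emergency"
  else
    let urgent : Int := ((levels.values).map (fun v => if v == 1 then (1 : Int) else 0)).sum
    PySem.List.pyGetD ["self_care", "routine", "urgent"] (min urgent 2) ""

-- ===== PRECONDITION & SPEC =====
def Spec_mock_urgency_py (symptoms : List String) (out : String) : Prop := out = mock_urgency_py_alt symptoms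
instance (symptoms : List String) (out : String) : Decidable (Spec_mock_urgency_py symptoms out) := by unfold Spec_mock_urgency_py; infer_instance

-- ===== CLAIM (what is proved, stated in full; the proofs are below) =====
def Claim_equal_mock_urgency_py : Prop := ∀ (symptoms : List String), Dom_mock_urgency_py symptoms → Spec_mock_urgency_py symptoms (mock_urgency_py symptoms)

-- ===== LEMMAS AND PROOFS =====

-- the severity table decodes to A's two membership sets (severity 2 = emergency)
lemma pv_sev_two (k : String) : (pvSeverity.getD k 0 = 2) ↔ PySem.Set.contains pvEmergencyA k = true := by
  have hs : pvSeverity = PySem.Dict.mk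
    [("chest_pain", 2), ("seizure", 2), ("breathlessness", 2), ("confusion", 2), ("blood_in_stool", 2),
     ("fever", 1), ("joint_pain", 1), ("rash", 1), ("yellow_skin", 1), ("blood_in_urine", 1)] := by decide
  have he : pvEmergencyA = ["chest_pain", "seizure", "breathlessness", "confusion", "blood_in_stool"] := by decide
  rw [hs, he]
  simp only [PySem.Dict.getD_eq_get?_getD, PySem.Dict.get?_mk_cons, PySem.Set.contains_eq_listContains,
    List.contains_cons, List.contains_nil, beq_iff_eq, Bool.or_eq_true]
  split_ifs with h1 h2 h3 h4 h5 h6 h7 h8 h9 h10 <;>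
    first
      | (subst k; decide)
      | (have hnone : (PySem.Dict.mk ([] : List (String × Int))).get? k = none := rfl
         rw [hnone]
         constructor
         · intro h; exact absurd h (by decide)
         · rintro (h | h | h | h | (h | h))
           exacts [absurd h.symm h1, absurd h.symm h2, absurd h.symm h3, absurd h.symm h4,
                   absurd h.symm h5, h.elim])

-- the severity table decodes to A's two membership sets (severity 1 = urgent)
lemma pv_sev_one (k : String) : (pvSeverity.getD k 0 = 1) ↔ PySem.Set.contains pvUrgentA k = true := by
  have hs : pvSeverity = PySem.Dict.mk
    [("chest_pain", 2), ("seizure", 2), ("breathlessness", 2), ("confusion", 2), ("blood_in_stool", 2),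
     ("fever", 1), ("joint_pain", 1), ("rash", 1), ("yellow_skin", 1), ("blood_in_urine", 1)] := by decide
  have hu : pvUrgentA = ["fever", "joint_pain", "rash", "yellow_skin", "blood_in_urine"] := by decide
  rw [hs, hu]
  simp only [PySem.Dict.getD_eq_get?_getD, PySem.Dict.get?_mk_cons, PySem.Set.contains_eq_listContains,
    List.contains_cons, List.contains_nil, beq_iff_eq, Bool.or_eq_true]
  split_ifs with h1 h2 h3 h4 h5 h6 h7 h8 h9 h10 <;>
    first
      | (subst k; decide)
      | (have hnone : (PySem.Dict.mk ([] : List (String × Int))).get? k = none := rfl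
         rw [hnone]
         constructor
         · intro h; exact absurd h (by decide)
         · rintro (h | h | h | h | (h | h))
           exacts [absurd h.symm h6, absurd h.symm h7, absurd h.symm h8, absurd h.symm h9,
                   absurd h.symm h10, h.elim])

-- lookups in B's comprehension dict: the value depends only on the key
lemma pv_levels_getD (xs : List String) (d : PySem.Dict String Int) (k : String) :
    (xs.foldl (fun d s => d.insert s (pvSeverity.getD s 0)) d).getD k 0
      = if k ∈ xs then pvSeverity.getD k 0 else d.getD k 0 := by
  induction xs generalizing d with
  | nil => simp
  | cons x xs ih =>
    rw [List.foldl_cons, ih]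
    by_cases hmem : k ∈ xs
    · simp [hmem]
    · by_cases hkx : k = x
      · subst hkx; simp
      · simp [hmem, hkx, PySem.Dict.getD_insert]

-- B's dict values are the severities of the distinct symptoms
lemma pv_levels_values (xs : List String) :
    (xs.foldl (fun d s => d.insert s (pvSeverity.getD s 0)) PySem.Dict.empty).values
      = (PySem.Set.ofList xs).map (fun k => pvSeverity.getD k 0) := by
  have hkeys : (xs.foldl (fun d s => d.insert s (pvSeverity.getD s 0)) PySem.Dict.empty).keys
      = PySem.Set.ofList xs := by
    rw [PySem.Dict.keys_foldl_insert, PySem.Dict.keys_empty, PySem.Set.update_nil_left]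
  have hnd : (xs.foldl (fun d s => d.insert s (pvSeverity.getD s 0)) PySem.Dict.empty).keys.Nodup := by
    rw [hkeys]; exact PySem.Set.nodup_ofList xs
  rw [PySem.Dict.values_eq_map_keys _ hnd 0, hkeys]
  refine List.map_congr_left (fun k hk => ?_)
  rw [pv_levels_getD]
  simp [(PySem.Set.mem_ofList xs k).1 hk]

-- ===== VERDICT (by name: the statement is the Claim_ definition above) =====
theorem mock_urgency_py_spec : Claim_equal_mock_urgency_py := by
  intro symptoms _
  unfold Spec_mock_urgency_py mock_urgency_py mock_urgency_py_alt
  dsimp only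
  rw [pv_levels_values]
  -- the emergency tests agree
  have hem : (((PySem.Set.ofList symptoms).map (fun k => pvSeverity.getD k 0)).contains 2)
      = symptoms.any (fun s => PySem.Set.contains pvEmergencyA s) := by
    rw [Bool.eq_iff_iff]
    simp only [List.contains_eq_mem, decide_eq_true_eq, List.mem_map, List.any_eq_true]
    constructor
    · rintro ⟨k, hk, hv⟩
      exact ⟨k, (PySem.Set.mem_ofList symptoms k).1 hk, (pv_sev_two k).1 hv⟩
    · rintro ⟨k, hk, hv⟩
      exact ⟨k, (PySem.Set.mem_ofList symptoms k).2 hk, (pv_sev_two k).2 hv⟩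
  -- the urgent counts agree
  have hcnt : (((PySem.Set.ofList symptoms).map (fun k => pvSeverity.getD k 0)).map
        (fun v => if v == 1 then (1 : Int) else 0)).sum
      = (PySem.Set.len (PySem.Set.inter (PySem.Set.ofList symptoms) pvUrgentA) : Int) := by
    rw [PySem.List.sum_map_ite_one_zero]
    have h1 : ((PySem.Set.ofList symptoms).map (fun k => pvSeverity.getD k 0)).countP (fun v => v == 1)
        = (PySem.Set.ofList symptoms).countP (fun k => PySem.Set.contains pvUrgentA k) := by
      rw [List.countP_map]
      refine List.countP_congr (fun k _ => ?_)
      simp only [Function.comp, beq_iff_eq]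
      rw [Bool.eq_iff_iff]
      simpa using pv_sev_one k
    rw [h1]
    simp [PySem.Set.len, PySem.Set.inter, List.countP_eq_length_filter]
  -- the any-urgent test is count ≥ 1
  have hany : symptoms.any (fun s => PySem.Set.contains pvUrgentA s) = true
      ↔ 1 ≤ (PySem.Set.ofList symptoms).countP (fun k => PySem.Set.contains pvUrgentA k) := by
    rw [List.any_eq_true, Nat.one_le_iff_ne_zero, Ne, List.countP_eq_zero]
    push Not
    constructor
    · rintro ⟨k, hk, hv⟩; exact ⟨k, (PySem.Set.mem_ofList symptoms k).2 hk, hv⟩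
    · rintro ⟨k, hk, hv⟩; exact ⟨k, (PySem.Set.mem_ofList symptoms k).1 hk, hv⟩
  rw [hem, hcnt]
  by_cases he : symptoms.any (fun s => PySem.Set.contains pvEmergencyA s) = true
  · rw [if_pos he, if_pos he]
  · rw [if_neg he, if_neg he]
    have hlen : PySem.Set.len (PySem.Set.inter (PySem.Set.ofList symptoms) pvUrgentA)
        = ((PySem.Set.ofList symptoms).countP (fun k => PySem.Set.contains pvUrgentA k) : Int) := by
      simp [PySem.Set.len, PySem.Set.inter, List.countP_eq_length_filter]
    rcases hn : (PySem.Set.ofList symptoms).countP (fun k => PySem.Set.contains pvUrgentA k) with _ | n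
    · have hany' : symptoms.any (fun s => PySem.Set.contains pvUrgentA s) = false := by
        rw [← Bool.not_eq_true]; intro h; have := hany.1 h; omega
      rw [hlen, hn, hany']
      norm_num
    · rcases n with _ | n
      · have hany' : symptoms.any (fun s => PySem.Set.contains pvUrgentA s) = true :=
          hany.2 (by omega)
        rw [hlen, hn, hany']
        norm_num
        rfl
      · rw [hlen, hn]
        have h2 : (2 : Int) ≤ ((n + 2 : Nat) : Int) := by push_cast; omega
        have hmin : min (((n + 2 : Nat) : Int)) 2 = 2 := by omega
        simp only [h2, if_true, hmin]
        rfl
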